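-- pv_equiv track=rewrite | github.com/AleandroPresta/algorithms-datastructures-notes | leetcode/arrays/roman_to_int.py | parse
-- ===== SOURCE A (Python) =====
-- from typing import Dict, List
--
-- def parse(s:str) -> List[str]:
--     # Input: MCMXCIV, Output: [M, CM, XC ,IV]
--     result: List[str] = []
--     # One literal string
--     if len(s) == 1:
--         result.append(s)
--         return result
--     i = 0
--     ub = len(s)-1
--     while(i <= ub):
--         if (i != ub and s[i] == 'I' and s[i+1] == 'V'):
--             result.append('IV')
--             i += 2
--             continue
--         if (i != ub and s[i] == 'I' and s[i+1] == 'X'):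
--             result.append('IX')
--             i += 2
--             continue
--         if (i != ub and s[i] == 'X' and s[i+1] == 'L'):
--             result.append('XL')
--             i += 2
--             continue
--         if (i != ub and s[i] == 'X' and s[i+1] == 'C'):
--             result.append('XC')
--             i += 2
--             continue
--         if (i != ub and s[i] == 'C' and s[i+1] == 'D'):
--             result.append('CD')
--             i += 2
--             continue
--         if (i != ub and s[i] == 'C' and s[i+1] == 'M'):
--             result.append('CM')
--             i += 2
--             continue
--         result.append(s[i])
--         i += 1
--     return result
-- ===== SOURCE B (Python) =====
-- SUBTRACTIVE = ('CM', 'CD', 'XC', 'XL', 'IX', 'IV')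
--
--
-- def parse(s: str):
--     # Consume the characters from a stack (front of the string on top),
--     # emitting a subtractive pair whenever the top two characters form one.
--     tokens = []
--     stack = list(reversed(s))
--     while stack:
--         a = stack.pop()
--         if stack and a + stack[-1] in SUBTRACTIVE:
--             tokens.append(a + stack.pop())
--         else:
--             tokens.append(a)
--     return tokens
-- ===== Notes on version B (the rewrite author's own statement) =====
-- stated objective: alternative
-- what changed: Replaces A's index arithmetic (ub = len-1 bound checks, a special case for length-1 strings, six hard-coded two-character branch chains) with a stack of characters consumed from the front and a single membership test of the top two characters against a table of the six subtractive pairs.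
import Mathlib
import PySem

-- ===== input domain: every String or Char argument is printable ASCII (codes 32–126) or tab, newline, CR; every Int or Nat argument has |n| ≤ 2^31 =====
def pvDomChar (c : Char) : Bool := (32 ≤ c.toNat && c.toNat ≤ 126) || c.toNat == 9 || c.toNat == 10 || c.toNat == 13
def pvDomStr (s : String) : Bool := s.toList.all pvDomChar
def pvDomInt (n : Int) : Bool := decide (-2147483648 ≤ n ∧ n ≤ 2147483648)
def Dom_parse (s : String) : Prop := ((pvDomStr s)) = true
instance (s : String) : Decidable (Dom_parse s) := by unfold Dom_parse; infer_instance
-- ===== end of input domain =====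

-- B replaces A's index loop (ub bound checks, a length-1 special case, six hard-coded
-- two-character branches) with a character stack consumed from the front and one
-- membership test against a table of the six subtractive pairs (objective: alternative).

-- ===== PORT A =====
-- Literal transliteration of A's while loop: i and ub are Python ints; s[i] is
-- PySem.List.pyGet? (always in range while the loop runs, so the `none` arm of
-- pvChar1 is never reached).
def pvChar1 (o : Option Char) : String :=
  match o with
  | some c => String.ofList [c]
  | none => ""

def parseLoop (cs : List Char) (ub i : Int) (result : List String) : List String :=
  if i ≤ ub then
    if i ≠ ub ∧ PySem.List.pyGet? cs i = some 'I' ∧ PySem.List.pyGet? cs (i+1) = some 'V' then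
      parseLoop cs ub (i+2) (result ++ ["IV"])
    else if i ≠ ub ∧ PySem.List.pyGet? cs i = some 'I' ∧ PySem.List.pyGet? cs (i+1) = some 'X' then
      parseLoop cs ub (i+2) (result ++ ["IX"])
    else if i ≠ ub ∧ PySem.List.pyGet? cs i = some 'X' ∧ PySem.List.pyGet? cs (i+1) = some 'L' then
      parseLoop cs ub (i+2) (result ++ ["XL"])
    else if i ≠ ub ∧ PySem.List.pyGet? cs i = some 'X' ∧ PySem.List.pyGet? cs (i+1) = some 'C' then
      parseLoop cs ub (i+2) (result ++ ["XC"])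
    else if i ≠ ub ∧ PySem.List.pyGet? cs i = some 'C' ∧ PySem.List.pyGet? cs (i+1) = some 'D' then
      parseLoop cs ub (i+2) (result ++ ["CD"])
    else if i ≠ ub ∧ PySem.List.pyGet? cs i = some 'C' ∧ PySem.List.pyGet? cs (i+1) = some 'M' then
      parseLoop cs ub (i+2) (result ++ ["CM"])
    else
      parseLoop cs ub (i+1) (result ++ [pvChar1 (PySem.List.pyGet? cs i)])
  else result
termination_by (ub + 1 - i).toNat
decreasing_by all_goals omega

def parse (s : String) : List String :=
  let cs := s.toList
  if cs.length = 1 then [s]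
  else parseLoop cs ((cs.length : Int) - 1) 0 []

-- ===== PORT B =====
def pvSubtractive : List String := ["CM", "CD", "XC", "XL", "IX", "IV"]

-- Port of B's stack loop: the Python stack holds the characters with the FRONT of the
-- string on top (list(reversed(s)) popped from the end), so the stack is exactly the
-- remaining suffix of s.toList consumed from the head; `a + stack[-1]` is
-- String.ofList [a, b].
def tokB : List Char → List String
  | [] => []
  | [a] => [String.ofList [a]]
  | a :: b :: rest =>
    if String.ofList [a, b] ∈ pvSubtractive then
      String.ofList [a, b] :: tokB rest
    else
      String.ofList [a] :: tokB (b :: rest)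

def parse_alt (s : String) : List String := tokB s.toList

-- ===== PRECONDITION & SPEC =====
def Spec_parse (s : String) (out : List String) : Prop := out = parse_alt s
instance (s : String) (out : List String) : Decidable (Spec_parse s out) := by unfold Spec_parse; infer_instance

-- ===== CLAIM (what is proved, stated in full; the proofs are below) =====
def Claim_equal_parse : Prop := ∀ (s : String), Dom_parse s → Spec_parse s (parse s)

-- ===== LEMMAS AND PROOFS =====

theorem mem_pvSubtractive (a b : Char) :
    String.ofList [a, b] ∈ pvSubtractive ↔
      (a = 'C' ∧ b = 'M') ∨ (a = 'C' ∧ b = 'D') ∨ (a = 'X' ∧ b = 'C') ∨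
      (a = 'X' ∧ b = 'L') ∨ (a = 'I' ∧ b = 'X') ∨ (a = 'I' ∧ b = 'V') := by
  have key : ∀ (c d : Char), String.ofList [a, b] = String.ofList [c, d] ↔ a = c ∧ b = d := by
    intro c d
    constructor
    · intro h
      have h2 := congrArg String.toList h
      simp [String.toList_ofList] at h2
      exact h2
    · rintro ⟨rfl, rfl⟩; rfl
  simpa [pvSubtractive, show ("CM" : String) = String.ofList ['C','M'] from rfl,
    show ("CD" : String) = String.ofList ['C','D'] from rfl,
    show ("XC" : String) = String.ofList ['X','C'] from rfl,
    show ("XL" : String) = String.ofList ['X','L'] from rfl,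
    show ("IX" : String) = String.ofList ['I','X'] from rfl,
    show ("IV" : String) = String.ofList ['I','V'] from rfl] using
      ⟨fun h => by rcases h with h|h|h|h|h|h <;> simp [key] at h <;> tauto,
       fun h => by rcases h with ⟨rfl,rfl⟩|⟨rfl,rfl⟩|⟨rfl,rfl⟩|⟨rfl,rfl⟩|⟨rfl,rfl⟩|⟨rfl,rfl⟩ <;> simp⟩

theorem parseLoop_eq (cs : List Char) :
    ∀ (n k : Nat) (acc : List String), cs.length ≤ k + n →
      parseLoop cs ((cs.length : Int) - 1) (k : Int) acc = acc ++ tokB (cs.drop k) := by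
  intro n
  induction n with
  | zero =>
    intro k acc h
    rw [parseLoop, List.drop_eq_nil_of_le (by omega), if_neg (by push_cast; omega)]
    simp [tokB]
  | succ n ih =>
    intro k acc h
    by_cases hk : cs.length ≤ k
    · rw [parseLoop, List.drop_eq_nil_of_le hk, if_neg (by push_cast; omega)]
      simp [tokB]
    · push Not at hk
      have ha : PySem.List.pyGet? cs (k : Int) = some cs[k] := by
        rw [PySem.List.pyGet?_natCast]; simp [hk]
      by_cases hlast : k + 1 = cs.length
      · -- last character: i = ub, every pair branch fails
        have hdrop : cs.drop k = [cs[k]] := by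
          rw [List.drop_eq_getElem_cons hk, List.drop_eq_nil_of_le (by omega)]
        rw [parseLoop, if_pos (by push_cast; omega)]
        have hne : ¬ ((k : Int) ≠ (cs.length : Int) - 1) := by push_cast; omega
        rw [if_neg (by tauto), if_neg (by tauto), if_neg (by tauto), if_neg (by tauto),
            if_neg (by tauto), if_neg (by tauto)]
        rw [show ((k : Int) + 1) = ((k + 1 : Nat) : Int) by push_cast; ring,
            ih (k+1) _ (by omega), List.drop_eq_nil_of_le (by omega), hdrop]
        simp [tokB, ha, pvChar1]
      · -- two characters remain: relate A's branch chain to B's membership test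
        have hk1 : k + 1 < cs.length := by omega
        have hb : PySem.List.pyGet? cs ((k : Int) + 1) = some cs[k+1] := by
          rw [show ((k : Int) + 1) = ((k + 1 : Nat) : Int) by push_cast; ring,
              PySem.List.pyGet?_natCast]
          simp [hk1]
        have hne : ((k : Int) ≠ (cs.length : Int) - 1) := by push_cast; omega
        have hdrop : cs.drop k = cs[k] :: cs[k+1] :: cs.drop (k+2) := by
          rw [List.drop_eq_getElem_cons hk, List.drop_eq_getElem_cons hk1,
              show k+1+1 = k+2 by omega]
        obtain ⟨a, hA⟩ : ∃ x, cs[k] = x := ⟨_, rfl⟩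
        obtain ⟨b, hB⟩ : ∃ x, cs[k+1] = x := ⟨_, rfl⟩
        rw [hA] at ha hdrop
        rw [hB] at hb hdrop
        rw [parseLoop, if_pos (by push_cast; omega), hdrop, tokB]
        by_cases hmem : String.ofList [a, b] ∈ pvSubtractive
        · rw [if_pos hmem]
          rw [mem_pvSubtractive] at hmem
          rcases hmem with ⟨rfl,rfl⟩|⟨rfl,rfl⟩|⟨rfl,rfl⟩|⟨rfl,rfl⟩|⟨rfl,rfl⟩|⟨rfl,rfl⟩ <;>
          · simp only [ha, hb, hne, ne_eq, not_false_eq_true, and_true,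
              Option.some.injEq, Char.reduceEq, and_false, if_true, if_false]
            rw [show ((k : Int) + 2) = ((k + 2 : Nat) : Int) by push_cast; ring,
                ih (k+2) _ (by omega)]
            simp
        · rw [if_neg hmem]
          rw [mem_pvSubtractive] at hmem
          push Not at hmem
          rw [if_neg (by rintro ⟨-, h1, h2⟩; rw [ha] at h1; rw [hb] at h2; simp only [Option.some.injEq] at h1 h2; subst h1; subst h2; simp_all),
              if_neg (by rintro ⟨-, h1, h2⟩; rw [ha] at h1; rw [hb] at h2; simp only [Option.some.injEq] at h1 h2; subst h1; subst h2; simp_all),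
              if_neg (by rintro ⟨-, h1, h2⟩; rw [ha] at h1; rw [hb] at h2; simp only [Option.some.injEq] at h1 h2; subst h1; subst h2; simp_all),
              if_neg (by rintro ⟨-, h1, h2⟩; rw [ha] at h1; rw [hb] at h2; simp only [Option.some.injEq] at h1 h2; subst h1; subst h2; simp_all),
              if_neg (by rintro ⟨-, h1, h2⟩; rw [ha] at h1; rw [hb] at h2; simp only [Option.some.injEq] at h1 h2; subst h1; subst h2; simp_all),
              if_neg (by rintro ⟨-, h1, h2⟩; rw [ha] at h1; rw [hb] at h2; simp only [Option.some.injEq] at h1 h2; subst h1; subst h2; simp_all)]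
          rw [show ((k : Int) + 1) = ((k + 1 : Nat) : Int) by push_cast; ring,
              ih (k+1) _ (by omega), List.drop_eq_getElem_cons hk1,
              show k+1+1 = k+2 by omega, hB]
          simp [pvChar1, ha]

-- ===== VERDICT (by name: the statement is the Claim_ definition above) =====
theorem parse_spec : Claim_equal_parse := by
  intro s _
  unfold Spec_parse parse parse_alt
  by_cases h1 : s.toList.length = 1
  · rw [if_pos h1]
    obtain ⟨c, hc⟩ : ∃ c, s.toList = [c] := by
      cases hl : s.toList with
      | nil => simp [hl] at h1
      | cons x xs => cases xs with
        | nil => exact ⟨x, rfl⟩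
        | cons y ys => simp [hl] at h1
    rw [hc, tokB]
    have : String.ofList [c] = s := by
      rw [← hc]; exact String.ofList_toList
    rw [this]
  · rw [if_neg h1]
    have := parseLoop_eq s.toList s.toList.length 0 [] (by omega)
    simpa using this
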